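-- pv_equiv track=rewrite | github.com/AlexTraveylan/advent_of_code_2024 | src/2024/day_8.py | is_anti_node
-- ===== SOURCE A (Python) =====
-- def distance_vector(
--     coord1: tuple[int, int], coord2: tuple[int, int]
-- ) -> tuple[int, int]:
--     return (coord1[0] - coord2[0], coord1[1] - coord2[1])
--
-- def has_double(vectors: list[tuple[int, int]]) -> bool:
--     seen = set(vectors)
--     return any(x1 * 2 == x2 and y1 * 2 == y2 for x1, y1 in vectors for x2, y2 in seen)
--
-- def is_anti_node(
--     coord: tuple[int, int], cell: str, antennes: dict[str, list[tuple[int, int]]]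
-- ) -> bool:
--     for antenne_type, coords in antennes.items():
--         distance_vectors = [distance_vector(coord, c) for c in coords]
--         if antenne_type != cell and has_double(distance_vectors):
--             return True
--     return False
-- ===== SOURCE B (Python) =====
-- def is_anti_node(coord, cell, antennes):
--     for antenne_type, coords in antennes.items():
--         if antenne_type == cell:
--             continue
--         pts = {(c[0], c[1]) for c in coords}
--         if any((2 * c[0] - coord[0], 2 * c[1] - coord[1]) in pts for c in coords):
--             return True
--     return False
-- ===== Notes on version B (the rewrite author's own statement) =====
-- stated objective: alternative
-- what changed: Replaces A's per-type all-pairs scan (build every distance vector, then compare each against each in has_double) by a hash-set index: the partner antenna required for coord to be an antinode of c1 is 2*c1 - coord, so B builds a set of antenna points once per type and does a single membership pass instead of the inner scan.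
import Mathlib
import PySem

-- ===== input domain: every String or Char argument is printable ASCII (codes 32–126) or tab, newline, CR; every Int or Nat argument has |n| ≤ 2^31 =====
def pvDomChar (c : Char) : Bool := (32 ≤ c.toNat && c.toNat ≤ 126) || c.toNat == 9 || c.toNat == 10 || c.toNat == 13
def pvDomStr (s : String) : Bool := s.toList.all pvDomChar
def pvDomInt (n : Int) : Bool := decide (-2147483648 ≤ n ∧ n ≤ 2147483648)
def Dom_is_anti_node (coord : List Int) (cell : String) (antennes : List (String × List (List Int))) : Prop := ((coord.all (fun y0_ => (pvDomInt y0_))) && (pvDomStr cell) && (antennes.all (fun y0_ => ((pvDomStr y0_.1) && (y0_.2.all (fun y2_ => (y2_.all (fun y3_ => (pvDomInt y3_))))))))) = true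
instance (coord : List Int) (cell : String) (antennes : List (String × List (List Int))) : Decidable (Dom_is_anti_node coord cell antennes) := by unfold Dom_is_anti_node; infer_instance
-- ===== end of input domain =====

-- B indexes each type's antenna points in a hash set and looks up the unique required
-- partner 2*c1 - coord per antenna instead of A's inner all-pairs scan (objective: alternative).

-- ===== PORT A =====
-- xs[i] with a literal in-range index under Pre_; the .getD 0 default is only reached
-- outside Pre_ (where Python raises IndexError).
def pvGet (xs : List Int) (i : Int) : Int := (PySem.List.pyGet? xs i).getD 0

-- def distance_vector(coord1, coord2): return (coord1[0]-coord2[0], coord1[1]-coord2[1])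
def distance_vector (coord1 coord2 : List Int) : Int × Int :=
  (pvGet coord1 0 - pvGet coord2 0, pvGet coord1 1 - pvGet coord2 1)

-- def has_double(vectors): seen = set(vectors); return any(... for v1 in vectors for v2 in seen)
def has_double (vectors : List (Int × Int)) : Bool :=
  let seen : PySem.Set (Int × Int) := PySem.Set.ofList vectors
  vectors.any (fun v1 => seen.any (fun v2 => v1.1 * 2 == v2.1 && v1.2 * 2 == v2.2))

-- the for-loop with early return, one recursive step per dict item
def isAntiNodeLoop (coord : List Int) (cell : String) : List (String × List (List Int)) → Bool
  | [] => false
  | (antenne_type, coords) :: rest =>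
    let distance_vectors := coords.map (fun c => distance_vector coord c)
    if antenne_type != cell && has_double distance_vectors then true
    else isAntiNodeLoop coord cell rest

def is_anti_node (coord : List Int) (cell : String) (antennes : List (String × List (List Int))) : Bool :=
  isAntiNodeLoop coord cell antennes

-- ===== PORT B =====
-- loop with early return; per type: build the point set once, then one membership pass
def isAntiNodeAltLoop (coord : List Int) (cell : String) : List (String × List (List Int)) → Bool
  | [] => false
  | (antenne_type, coords) :: rest =>
    if antenne_type == cell then isAntiNodeAltLoop coord cell rest
    else
      let pts : PySem.Set (Int × Int) := PySem.Set.ofList (coords.map (fun c => (pvGet c 0, pvGet c 1)))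
      if coords.any (fun c =>
          pts.contains (2 * pvGet c 0 - pvGet coord 0, 2 * pvGet c 1 - pvGet coord 1)) then true
      else isAntiNodeAltLoop coord cell rest

def is_anti_node_alt (coord : List Int) (cell : String) (antennes : List (String × List (List Int))) : Bool :=
  isAntiNodeAltLoop coord cell antennes

-- ===== PRECONDITION & SPEC =====
-- Pre_ excludes exactly the inputs on which Python A raises IndexError: some antenna point
-- shorter than 2, or coord shorter than 2 while some type has antennas.
def Pre_is_anti_node (coord : List Int) (cell : String) (antennes : List (String × List (List Int))) : Prop :=
  (∀ p ∈ antennes, ∀ c ∈ p.2, 2 ≤ c.length) ∧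
  (2 ≤ coord.length ∨ ∀ p ∈ antennes, p.2 = [])
instance (coord : List Int) (cell : String) (antennes : List (String × List (List Int))) : Decidable (Pre_is_anti_node coord cell antennes) := by unfold Pre_is_anti_node; infer_instance

def pvWitness_is_anti_node : List Int × String × (List (String × List (List Int))) :=
  ([5, 3], "x", [("a", [[1, 2], [3, 4]])])

def Spec_is_anti_node (coord : List Int) (cell : String) (antennes : List (String × List (List Int))) (out : Bool) : Prop := out = is_anti_node_alt coord cell antennes
instance (coord : List Int) (cell : String) (antennes : List (String × List (List Int))) (out : Bool) : Decidable (Spec_is_anti_node coord cell antennes out) := by unfold Spec_is_anti_node; infer_instance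

-- ===== CLAIM (what is proved, stated in full; the proofs are below) =====
def Claim_equal_is_anti_node : Prop := ∀ (coord : List Int) (cell : String) (antennes : List (String × List (List Int))), Dom_is_anti_node coord cell antennes → Pre_is_anti_node coord cell antennes → Spec_is_anti_node coord cell antennes (is_anti_node coord cell antennes)

-- ===== LEMMAS AND PROOFS =====

-- per-type agreement: A's has_double over the vector list = B's set-membership pass
lemma has_double_eq_lookup (coord : List Int) (cs : List (List Int)) :
    has_double (cs.map (fun c => distance_vector coord c)) =
    cs.any (fun c =>
      (PySem.Set.ofList (cs.map (fun c => (pvGet c 0, pvGet c 1)))).contains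
        (2 * pvGet c 0 - pvGet coord 0, 2 * pvGet c 1 - pvGet coord 1)) := by
  rw [Bool.eq_iff_iff]
  simp [has_double, List.any_map, List.any_eq_true, PySem.Set.mem_ofList,
    PySem.Set.contains, List.mem_map, distance_vector]
  constructor
  · rintro ⟨c1, h1, c2, h2, hA, hB⟩
    exact ⟨c1, h1, c2, h2, by omega, by omega⟩
  · rintro ⟨c1, h1, c2, h2, hA, hB⟩
    exact ⟨c1, h1, c2, h2, by omega, by omega⟩

lemma loop_eq_loop (coord : List Int) (cell : String) (antennes : List (String × List (List Int))) :
    isAntiNodeLoop coord cell antennes = isAntiNodeAltLoop coord cell antennes := by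
  induction antennes with
  | nil => rfl
  | cons p rest ih =>
    obtain ⟨t, cs⟩ := p
    simp only [isAntiNodeLoop, isAntiNodeAltLoop]
    rw [has_double_eq_lookup coord cs]
    by_cases ht : t = cell
    · simp [ht, ih]
    · simp only [bne, beq_iff_eq, ht, if_false, Bool.not_false, Bool.true_and, ite_not]
      split <;> simp_all

-- ===== VERDICT (by name: the statement is the Claim_ definition above) =====
theorem is_anti_node_spec : Claim_equal_is_anti_node := by
  intro coord cell antennes _ _
  unfold Spec_is_anti_node is_anti_node is_anti_node_alt
  exact loop_eq_loop coord cell antennes
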